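-- pv_equiv track=rewrite | github.com/projetmbc/for-writing | @prism/tools/building/05-FINAL-DATA/03-c-DB-update-kind-for-all.py | get_std_kind
-- ===== SOURCE A (Python) =====
-- def get_std_kind(kind):
--     _kind = sorted(
--         list(
--             set(
--                 k.strip()
--                 for k in kind.split(',')
--                 if k.strip()
--             )
--         )
--     )
--
--     return ','.join(_kind)
-- ===== SOURCE B (Python) =====
-- def _insert(t, out):
--     # insert t into the sorted, duplicate-free list out, keeping it sorted and duplicate-free
--     if not out:
--         return [t]
--     if out[0] < t:
--         return [out[0]] + _insert(t, out[1:])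
--     if out[0] == t:
--         return out
--     return [t] + out
--
--
-- def get_std_kind(kind):
--     out = []
--     for k in kind.split(','):
--         t = k.strip()
--         if t:
--             out = _insert(t, out)
--     return ','.join(out)
-- ===== Notes on version B (the rewrite author's own statement) =====
-- stated objective: alternative
-- what changed: instead of collecting tokens into a set and sorting at the end, B maintains a sorted duplicate-free list incrementally, inserting each stripped token at its ordered position with a recursive helper (ordered-insertion sort with dedup); no set and no sort call
import Mathlib
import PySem

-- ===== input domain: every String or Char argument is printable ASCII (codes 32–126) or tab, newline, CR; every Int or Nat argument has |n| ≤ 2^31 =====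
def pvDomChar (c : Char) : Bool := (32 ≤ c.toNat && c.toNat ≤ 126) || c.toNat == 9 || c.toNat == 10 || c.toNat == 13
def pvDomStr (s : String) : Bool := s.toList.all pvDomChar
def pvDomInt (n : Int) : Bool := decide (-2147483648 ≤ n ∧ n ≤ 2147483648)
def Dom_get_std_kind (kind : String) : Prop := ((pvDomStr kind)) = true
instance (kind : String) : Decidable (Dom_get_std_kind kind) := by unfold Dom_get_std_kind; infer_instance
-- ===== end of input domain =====

-- B replaces A's set-then-sort with incremental ordered insertion into a sorted duplicate-free
-- list (objective: alternative; same result, different algorithm).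

-- ===== PORT A =====
-- kind.split(','): sep is the literal "," ≠ "", so Str.split? is always `some`; .getD [] only unwraps it
def get_std_kind (kind : String) : String :=
  let toks : List String :=
    (((PySem.Str.split? kind ",").getD []).map (fun k => PySem.Str.strip k)).filter
      (fun t => t ≠ "")
  let _kind := PySem.List.sorted (PySem.Set.ofList toks) (fun x => x) false
  PySem.Str.join "," _kind

-- ===== PORT B =====
-- _insert: put t into the sorted, duplicate-free list out (recursion mirrors Source B's _insert)
def pvInsertStd (t : String) : List String → List String
  | [] => [t]
  | x :: xs => if x < t then x :: pvInsertStd t xs else if x = t then x :: xs else t :: x :: xs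

def get_std_kind_alt (kind : String) : String :=
  let out := ((PySem.Str.split? kind ",").getD []).foldl
    (fun out k =>
      let t := PySem.Str.strip k
      if t ≠ "" then pvInsertStd t out else out) []
  PySem.Str.join "," out

-- ===== PRECONDITION & SPEC =====
def Spec_get_std_kind (kind : String) (out : String) : Prop := out = get_std_kind_alt kind
instance (kind : String) (out : String) : Decidable (Spec_get_std_kind kind out) := by unfold Spec_get_std_kind; infer_instance

-- ===== CLAIM (what is proved, stated in full; the proofs are below) =====
def Claim_equal_get_std_kind : Prop := ∀ (kind : String), Dom_get_std_kind kind → Spec_get_std_kind kind (get_std_kind kind)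

-- ===== LEMMAS AND PROOFS =====

theorem pv_mem_pvInsertStd (t x : String) (L : List String) :
    x ∈ pvInsertStd t L ↔ x = t ∨ x ∈ L := by
  induction L with
  | nil => simp [pvInsertStd]
  | cons a l ih =>
    simp only [pvInsertStd]
    split_ifs with h1 h2
    · simp only [List.mem_cons, ih]; tauto
    · subst h2; simp only [List.mem_cons]; tauto
    · simp only [List.mem_cons]

theorem pv_pairwise_pvInsertStd (t : String) (L : List String)
    (h : L.Pairwise (· < ·)) : (pvInsertStd t L).Pairwise (· < ·) := by
  induction L with
  | nil => simp [pvInsertStd]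
  | cons a l ih =>
    simp only [pvInsertStd]
    rcases List.pairwise_cons.mp h with ⟨ha, hl⟩
    split_ifs with h1 h2
    · refine List.pairwise_cons.mpr ⟨?_, ih hl⟩
      intro y hy
      rcases (pv_mem_pvInsertStd t y l).mp hy with rfl | hyl
      · exact h1
      · exact ha y hyl
    · exact h
    · have hat : t < a := lt_of_le_of_ne (not_lt.mp h1) (Ne.symm h2)
      refine List.pairwise_cons.mpr ⟨?_, h⟩
      intro y hy
      rcases List.mem_cons.mp hy with rfl | hyl
      · exact hat
      · exact lt_trans hat (ha y hyl)

set_option maxHeartbeats 1000000 in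
-- invariant of B's loop: result stays sorted (<) and collects the non-empty stripped tokens
theorem pv_fold_insert_inv (ks : List String) (L : List String)
    (h : L.Pairwise (· < ·)) :
    (ks.foldl (fun out k =>
        let t := PySem.Str.strip k
        if t ≠ "" then pvInsertStd t out else out) L).Pairwise (· < ·) ∧
    ∀ x, x ∈ ks.foldl (fun out k =>
        let t := PySem.Str.strip k
        if t ≠ "" then pvInsertStd t out else out) L ↔
      x ∈ L ∨ x ∈ (ks.map (fun k => PySem.Str.strip k)).filter (fun t => t ≠ "") := by
  induction ks generalizing L with
  | nil => exact ⟨h, fun x => by simp⟩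
  | cons k ks ih =>
    have hstep : (let t := PySem.Str.strip k
        if t ≠ "" then pvInsertStd t L else L)
        = if PySem.Str.strip k ≠ "" then pvInsertStd (PySem.Str.strip k) L else L := rfl
    rw [List.foldl_cons]
    rw [hstep, List.map_cons, List.filter_cons]
    by_cases hk : PySem.Str.strip k ≠ ""
    · rw [if_pos hk]
      obtain ⟨hp, hm⟩ := ih (pvInsertStd (PySem.Str.strip k) L) (pv_pairwise_pvInsertStd _ _ h)
      refine ⟨hp, fun x => ?_⟩
      rw [hm x, pv_mem_pvInsertStd, if_pos (decide_eq_true hk)]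
      simp only [List.mem_cons]
      tauto
    · rw [if_neg hk, if_neg (by simpa using hk)]
      obtain ⟨hp, hm⟩ := ih L h
      exact ⟨hp, fun x => hm x⟩

-- ===== VERDICT (by name: the statement is the Claim_ definition above) =====
theorem get_std_kind_spec : Claim_equal_get_std_kind := by
  intro kind _
  unfold Spec_get_std_kind get_std_kind get_std_kind_alt
  set ks : List String := (PySem.Str.split? kind ",").getD [] with hks
  simp only []
  congr 1
  obtain ⟨hp, hm⟩ := pv_fold_insert_inv ks [] List.Pairwise.nil
  refine PySem.List.sorted_eq_of_perm_of_pairwise_lt _ _ _ ?_ hp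
  refine (List.perm_ext_iff_of_nodup (hp.imp ne_of_lt) (PySem.Set.nodup_ofList _)).mpr ?_
  intro x
  rw [hm x, PySem.Set.mem_ofList]
  simp
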